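-- pv_equiv track=rewrite | github.com/nodetool-ai/nodetool-base | src/nodetool/nodes/lib/text_utils.py | _tokenize_whitespace
-- ===== SOURCE A (Python) =====
-- from typing import List, Tuple
--
-- def _tokenize_whitespace(s: str) -> tuple[list[str], list[int]]:
--     """Collapse consecutive whitespace into single-space tokens and map to original indices.
--
--     Returns (tokens, end_index_map), where end_index_map[i] is the exclusive
--     end-character index in the original string for tokens[i].
--     """
--     tokens: List[str] = []
--     end_idx: List[int] = []
--     i = 0
--     n = len(s)
--     while i < n:
--         ch = s[i]
--         if ch.isspace():
--             j = i + 1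
--             while j < n and s[j].isspace():
--                 j += 1
--             tokens.append(" ")
--             end_idx.append(j)
--             i = j
--         else:
--             tokens.append(ch)
--             end_idx.append(i + 1)
--             i += 1
--     return tokens, end_idx
-- ===== SOURCE B (Python) =====
-- from itertools import groupby
-- from typing import List, Tuple
--
-- def _tokenize_whitespace(s: str) -> tuple[list[str], list[int]]:
--     """Collapse consecutive whitespace into single-space tokens and map to original indices."""
--     tokens: List[str] = []
--     end_idx: List[int] = []
--     pos = 0
--     for is_space, grp in groupby(s, key=str.isspace):
--         chunk = list(grp)
--         if is_space:
--             pos += len(chunk)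
--             tokens.append(" ")
--             end_idx.append(pos)
--         else:
--             for ch in chunk:
--                 pos += 1
--                 tokens.append(ch)
--                 end_idx.append(pos)
--     return tokens, end_idx
-- ===== Notes on version B (the rewrite author's own statement) =====
-- stated objective: idiomatic
-- what changed: Replaced the index-based while loop with its nested inner whitespace scan by an itertools.groupby pass over maximal runs of same whitespace-ness with a running position counter.
import Mathlib
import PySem

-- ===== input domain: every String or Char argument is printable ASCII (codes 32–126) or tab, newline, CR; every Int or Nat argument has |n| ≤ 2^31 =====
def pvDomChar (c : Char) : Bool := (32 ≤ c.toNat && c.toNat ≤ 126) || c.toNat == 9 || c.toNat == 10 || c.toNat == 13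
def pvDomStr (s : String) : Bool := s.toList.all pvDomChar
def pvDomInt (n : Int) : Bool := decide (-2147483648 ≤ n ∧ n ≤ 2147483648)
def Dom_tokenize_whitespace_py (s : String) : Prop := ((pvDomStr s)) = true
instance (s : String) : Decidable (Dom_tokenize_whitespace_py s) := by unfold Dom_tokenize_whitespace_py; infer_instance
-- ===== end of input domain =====

-- B replaces A's index-based while loop (with a nested whitespace scan) by a single
-- groupby pass over maximal runs of same whitespace-ness; return value only, no mutation.

-- ===== PORT A =====
-- inner `while j < n and s[j].isspace(): j += 1` : consumes leading whitespace, returns (rest, j)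
def aSkipWs : List Char → Int → List Char × Int
  | [], j => ([], j)
  | c :: cs, j => if PySem.Chars.isspace c then aSkipWs cs (j + 1) else (c :: cs, j)

theorem aSkipWs_len_le : ∀ (l : List Char) (j : Int), (aSkipWs l j).1.length ≤ l.length := by
  intro l
  induction l with
  | nil => intro j; simp [aSkipWs]
  | cons c cs ih =>
    intro j
    simp only [aSkipWs]
    split
    · exact le_trans (ih (j + 1)) (Nat.le_succ _)
    · simp

-- the outer `while i < n` loop, one step per iteration
def aGo : List Char → Int → List String × List Int
  | [], _ => ([], [])
  | c :: cs, i =>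
    if PySem.Chars.isspace c then
      let r := aSkipWs cs (i + 1)
      let t := aGo r.1 r.2
      (" " :: t.1, r.2 :: t.2)
    else
      let t := aGo cs (i + 1)
      (String.ofList [c] :: t.1, (i + 1) :: t.2)
termination_by l => l.length
decreasing_by
  · exact Nat.lt_succ_of_le (aSkipWs_len_le cs (i + 1))
  · simp

def tokenize_whitespace_py (s : String) : List String × List Int :=
  aGo s.toList 0

-- ===== PORT B =====
-- itertools.groupby(s, key=str.isspace): maximal runs of characters with equal key
def bRuns : List Char → List (List Char)
  | [] => []
  | c :: cs =>
    (c :: cs.takeWhile (fun d => PySem.Chars.isspace d == PySem.Chars.isspace c)) ::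
      bRuns (cs.dropWhile (fun d => PySem.Chars.isspace d == PySem.Chars.isspace c))
termination_by l => l.length
decreasing_by
  exact Nat.lt_succ_of_le (List.length_dropWhile_le _ _)

-- inner `for ch in chunk` loop of the non-space branch
def bEmit : List Char → Int → List String × List Int
  | [], _ => ([], [])
  | c :: cs, pos =>
    let t := bEmit cs (pos + 1)
    (String.ofList [c] :: t.1, (pos + 1) :: t.2)

-- the `for is_space, grp in groupby(...)` loop with running position counter
def bGo : List (List Char) → Int → List String × List Int
  | [], _ => ([], [])
  | g :: gs, pos =>
    if g.any PySem.Chars.isspace then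
      let pos' := pos + (g.length : Int)
      let t := bGo gs pos'
      (" " :: t.1, pos' :: t.2)
    else
      let e := bEmit g pos
      let t := bGo gs (pos + (g.length : Int))
      (e.1 ++ t.1, e.2 ++ t.2)

def tokenize_whitespace_py_alt (s : String) : List String × List Int :=
  bGo (bRuns s.toList) 0

-- ===== PRECONDITION & SPEC =====
def Spec_tokenize_whitespace_py (s : String) (out : List String × List Int) : Prop := out = tokenize_whitespace_py_alt s
instance (s : String) (out : List String × List Int) : Decidable (Spec_tokenize_whitespace_py s out) := by unfold Spec_tokenize_whitespace_py; infer_instance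

-- ===== CLAIM (what is proved, stated in full; the proofs are below) =====
def Claim_equal_tokenize_whitespace_py : Prop := ∀ (s : String), Dom_tokenize_whitespace_py s → Spec_tokenize_whitespace_py s (tokenize_whitespace_py s)

-- ===== LEMMAS AND PROOFS =====

theorem aSkipWs_eq (l : List Char) (j : Int) :
    aSkipWs l j = (l.dropWhile PySem.Chars.isspace,
      j + ((l.takeWhile PySem.Chars.isspace).length : Int)) := by
  induction l generalizing j with
  | nil => simp [aSkipWs]
  | cons c cs ih =>
    by_cases h : PySem.Chars.isspace c
    · simp [aSkipWs, h, ih]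
      ring
    · simp [aSkipWs, h]

-- peeling the leading non-space run off bGo ∘ bRuns
theorem bGo_runs_nonspace_peel (cs : List Char) (i : Int) :
    bGo (bRuns cs) i =
      (let tw := cs.takeWhile (fun d => !PySem.Chars.isspace d)
       let e := bEmit tw i
       let t := bGo (bRuns (cs.dropWhile (fun d => !PySem.Chars.isspace d))) (i + (tw.length : Int))
       (e.1 ++ t.1, e.2 ++ t.2)) := by
  cases cs with
  | nil => simp [bRuns, bEmit, bGo]
  | cons d cs' =>
    by_cases h : PySem.Chars.isspace d
    · simp [h, bEmit]
    · have hpred : (fun e => PySem.Chars.isspace e == PySem.Chars.isspace d)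
          = (fun e => !PySem.Chars.isspace e) := by
        funext e; simp [h]
      have hany : ((d :: cs'.takeWhile (fun e => !PySem.Chars.isspace e)).any
          PySem.Chars.isspace) = false := by
        rw [List.any_eq_false]
        intro x hx
        rcases List.mem_cons.mp hx with rfl | hx'
        · simpa using h
        · simpa using List.mem_takeWhile_imp hx'
      simp only [bRuns, hpred, List.takeWhile_cons, List.dropWhile_cons]
      simp only [show (!PySem.Chars.isspace d) = true by simp [h], if_true]
      rw [bGo, if_neg (by rw [hany]; simp)]

theorem aGo_eq_bGo : ∀ (n : ℕ) (l : List Char), l.length ≤ n →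
    ∀ (i : Int), aGo l i = bGo (bRuns l) i := by
  intro n
  induction n with
  | zero =>
    intro l hl i
    have : l = [] := List.eq_nil_of_length_eq_zero (Nat.le_zero.mp hl)
    subst this
    simp [aGo, bRuns, bGo]
  | succ n ih =>
    intro l hl i
    cases l with
    | nil => simp [aGo, bRuns, bGo]
    | cons c cs =>
      have hl' : cs.length ≤ n := by simpa using hl
      by_cases h : PySem.Chars.isspace c
      · -- whitespace run
        have hpred : (fun e => PySem.Chars.isspace e == PySem.Chars.isspace c)
            = PySem.Chars.isspace := by
          funext e; simp [h]
        have hrest : (cs.dropWhile PySem.Chars.isspace).length ≤ n :=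
          le_trans (List.length_dropWhile_le _ _) hl'
        have hpos : i + 1 + ((cs.takeWhile PySem.Chars.isspace).length : Int)
            = i + (((c :: cs.takeWhile PySem.Chars.isspace)).length : Int) := by
          push_cast [List.length_cons]; ring
        simp only [aGo, h, if_pos, aSkipWs_eq]
        rw [ih _ hrest, bRuns, hpred, bGo,
          if_pos (by simp [h] : ((c :: cs.takeWhile PySem.Chars.isspace).any
            PySem.Chars.isspace) = true), hpos]
      · -- single non-space character
        have hpred : (fun e => PySem.Chars.isspace e == PySem.Chars.isspace c)
            = (fun e => !PySem.Chars.isspace e) := by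
          funext e; simp [h]
        have hany : ¬ (((c :: cs.takeWhile (fun e => !PySem.Chars.isspace e)).any
            PySem.Chars.isspace) = true) := by
          intro hx
          rcases List.any_eq_true.mp hx with ⟨x, hmem, hsp⟩
          rcases List.mem_cons.mp hmem with rfl | hx'
          · exact h hsp
          · have := List.mem_takeWhile_imp hx'
            simp [hsp] at this
        have hpos : i + 1 + (((cs.takeWhile fun e => !PySem.Chars.isspace e).length : Int))
            = i + (((c :: cs.takeWhile fun e => !PySem.Chars.isspace e)).length : Int) := by
          push_cast [List.length_cons]; ring
        simp only [aGo, if_neg h]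
        rw [ih cs hl', bGo_runs_nonspace_peel cs (i + 1), bRuns, hpred, bGo, if_neg hany]
        simp only [bEmit, hpos]
        simp

-- ===== VERDICT (by name: the statement is the Claim_ definition above) =====
theorem tokenize_whitespace_py_spec : Claim_equal_tokenize_whitespace_py := by
  intro s _
  unfold Spec_tokenize_whitespace_py tokenize_whitespace_py tokenize_whitespace_py_alt
  exact aGo_eq_bGo s.toList.length s.toList le_rfl 0
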